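-- pv_equiv track=rewrite | github.com/noecamacho/advent-of-code-2018 | day2/day2.py | countThree
-- ===== SOURCE A (Python) =====
-- from collections import defaultdict
--
-- def countThree(sentence):
--   lineMap = defaultdict(int)
--   for char in sentence:
--     lineMap[char] = lineMap[char] + 1
--   for char in lineMap:
--     if lineMap[char] == 3:
--       return 1
--   return 0
-- ===== SOURCE B (Python) =====
-- def countThree(sentence):
--   chars = sorted(sentence)
--   if not chars:
--     return 0
--   run = 1
--   prev = chars[0]
--   for cur in chars[1:]:
--     if cur == prev:
--       run += 1
--     else:
--       if run == 3:
--         return 1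
--       run = 1
--       prev = cur
--   return 1 if run == 3 else 0
-- ===== Notes on version B (the rewrite author's own statement) =====
-- stated objective: alternative
-- what changed: Replaces the frequency dict plus key scan by sorting the characters and scanning consecutive equal runs in one pass, returning 1 as soon as a run has length exactly 3.
import Mathlib
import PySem

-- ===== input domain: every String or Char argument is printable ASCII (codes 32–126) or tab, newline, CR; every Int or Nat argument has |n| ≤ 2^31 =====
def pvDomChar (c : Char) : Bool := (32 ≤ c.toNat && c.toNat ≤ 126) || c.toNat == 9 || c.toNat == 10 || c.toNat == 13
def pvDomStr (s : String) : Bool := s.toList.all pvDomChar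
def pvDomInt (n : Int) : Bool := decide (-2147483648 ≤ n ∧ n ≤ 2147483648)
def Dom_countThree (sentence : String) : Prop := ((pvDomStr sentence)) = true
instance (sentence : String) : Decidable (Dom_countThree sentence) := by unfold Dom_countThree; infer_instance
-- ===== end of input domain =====

-- B sorts the characters and scans consecutive equal runs instead of building a frequency dict; alternative decomposition, same results.

-- ===== PORT A =====
-- second loop of A: first key whose count is 3 returns 1, else 0
def countThreeFind (d : PySem.Dict Char Int) : List Char → Int
  | [] => 0
  | c :: rest => if d.getD c 0 == 3 then 1 else countThreeFind d rest

def countThree (sentence : String) : Int :=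
  let lineMap := sentence.toList.foldl (fun d c => d.insert c (d.getD c 0 + 1)) PySem.Dict.empty
  countThreeFind lineMap lineMap.keys

-- ===== PORT B =====
-- the for-loop of B: current run length, previous char, remaining sorted chars
def runScan (run : Int) (prev : Char) : List Char → Int
  | [] => if run == 3 then 1 else 0
  | c :: rest =>
      if c == prev then runScan (run + 1) prev rest
      else if run == 3 then 1 else runScan 1 c rest

def countThree_alt (sentence : String) : Int :=
  match PySem.List.sorted sentence.toList (fun x => x) false with
  | [] => 0
  | c :: rest => runScan 1 c rest

-- ===== PRECONDITION & SPEC =====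
def Spec_countThree (sentence : String) (out : Int) : Prop := out = countThree_alt sentence
instance (sentence : String) (out : Int) : Decidable (Spec_countThree sentence out) := by unfold Spec_countThree; infer_instance

-- ===== CLAIM (what is proved, stated in full; the proofs are below) =====
def Claim_equal_countThree : Prop := ∀ (sentence : String), Dom_countThree sentence → Spec_countThree sentence (countThree sentence)

-- ===== LEMMAS AND PROOFS =====

lemma countThreeFind_eq (d : PySem.Dict Char Int) (ks : List Char) :
    countThreeFind d ks = if (∃ c ∈ ks, d.getD c 0 = 3) then 1 else 0 := by
  induction ks with
  | nil => simp [countThreeFind]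
  | cons c rest ih =>
    by_cases h : d.getD c 0 = 3
    · simp [countThreeFind, h]
    · simp [countThreeFind, h, ih]

lemma countThree_char (sentence : String) :
    countThree sentence =
      if (∃ c ∈ sentence.toList, sentence.toList.count c = 3) then 1 else 0 := by
  unfold countThree
  rw [PySem.Dict.foldl_insert_getD_add_one_eq_counter, countThreeFind_eq]
  apply if_congr _ rfl rfl
  constructor
  · rintro ⟨c, hc, h3⟩
    refine ⟨c, ?_, ?_⟩
    · rw [PySem.Dict.keys_counter] at hc
      exact (PySem.Set.mem_ofList _ _).mp hc
    · rw [PySem.Dict.getD_counter] at h3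
      exact_mod_cast h3
  · rintro ⟨c, hc, h3⟩
    refine ⟨c, ?_, ?_⟩
    · rw [PySem.Dict.keys_counter]
      exact (PySem.Set.mem_ofList _ _).mpr hc
    · rw [PySem.Dict.getD_counter]
      exact_mod_cast h3

lemma runScan_spec (m : List Char) (prev : Char) (r : Int)
    (hs : m.Pairwise (· ≤ ·)) (hp : ∀ x ∈ m, prev ≤ x) :
    runScan r prev m =
      if (r + (m.count prev : Int) = 3 ∨ ∃ x ∈ m, x ≠ prev ∧ m.count x = 3) then 1 else 0 := by
  induction m generalizing r prev with
  | nil =>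
      by_cases h : r = 3 <;> simp [runScan, h]
  | cons c rest ih =>
      rcases List.pairwise_cons.mp hs with ⟨hcle, hrest⟩
      by_cases hc : c = prev
      · subst hc
        have h1 : runScan r c (c :: rest) = runScan (r + 1) c rest := by simp [runScan]
        rw [h1, ih c (r + 1) hrest hcle]
        apply if_congr _ rfl rfl
        have hcount : ((c :: rest).count c : Int) = (rest.count c : Int) + 1 := by
          simp
        constructor
        · rintro (h | ⟨x, hx, hxc, h3⟩)
          · left; rw [hcount]; omega
          · right
            refine ⟨x, List.mem_cons_of_mem _ hx, hxc, ?_⟩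
            rw [List.count_cons, if_neg (by simp [Ne.symm hxc])]
            simpa using h3
        · rintro (h | ⟨x, hx, hxc, h3⟩)
          · left; rw [hcount] at h; omega
          · right
            rcases List.mem_cons.mp hx with h' | h'
            · exact absurd h' hxc
            · refine ⟨x, h', hxc, ?_⟩
              rw [List.count_cons, if_neg (by simp [Ne.symm hxc])] at h3
              simpa using h3
      · have hlt : prev < c := lt_of_le_of_ne (hp c (List.mem_cons_self)) (fun h => hc h.symm)
        have hnotmem : prev ∉ rest := fun h =>
          absurd (hcle prev h) (by exact not_le.mpr hlt)
        have hcount0 : (c :: rest).count prev = 0 := by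
          simp [List.count_eq_zero, hc, hnotmem]
        have hstep : runScan r prev (c :: rest) =
            if r == 3 then 1 else runScan 1 c rest := by
          simp [runScan, hc]
        rw [hstep]
        by_cases hr : r = 3
        · simp [hr, hcount0]
        · have hne : (r == 3) = false := by simp [hr]
          rw [hne]
          simp only [Bool.false_eq_true, if_false]
          rw [ih c 1 hrest hcle]
          apply if_congr _ rfl rfl
          constructor
          · rintro (h | ⟨x, hx, hxc, h3⟩)
            · right
              refine ⟨c, List.mem_cons_self, hc, ?_⟩
              simp only [List.count_cons_self]
              omega
            · right
              refine ⟨x, List.mem_cons_of_mem _ hx,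
                (lt_of_lt_of_le hlt (hcle x hx)).ne', ?_⟩
              rw [List.count_cons, if_neg (by simp [Ne.symm hxc])]
              simpa using h3
          · rintro (h | ⟨x, hx, hxp, h3⟩)
            · rw [hcount0] at h
              exfalso; omega
            · by_cases hxceq : x = c
              · subst hxceq
                left
                simp only [List.count_cons_self] at h3
                omega
              · right
                rcases List.mem_cons.mp hx with h' | h'
                · exact absurd h' hxceq
                · refine ⟨x, h', hxceq, ?_⟩
                  rw [List.count_cons, if_neg (by simp [Ne.symm hxceq])] at h3
                  simpa using h3

lemma countThree_alt_char (s : String) :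
    countThree_alt s =
      if (∃ c ∈ s.toList, s.toList.count c = 3) then 1 else 0 := by
  unfold countThree_alt
  rcases hm : PySem.List.sorted s.toList (fun x => x) false with _ | ⟨c, rest⟩
  · have hnil : s.toList = [] := (PySem.List.sorted_eq_nil_iff _ _ _).mp hm
    simp [hnil]
  · have hpair : (c :: rest).Pairwise (· ≤ ·) := by
      have := PySem.List.sorted_pairwise s.toList (fun x => x)
      rw [hm] at this
      simpa using this
    have hperm : (c :: rest).Perm s.toList := by
      have := PySem.List.sorted_perm s.toList (fun x => x) false
      rw [hm] at this
      exact this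
    rcases List.pairwise_cons.mp hpair with ⟨hcle, hrest⟩
    show runScan 1 c rest = _
    rw [runScan_spec rest c 1 hrest hcle]
    apply if_congr _ rfl rfl
    have hmemiff : ∀ x, x ∈ (c :: rest) ↔ x ∈ s.toList := fun x => hperm.mem_iff
    have hcountiff : ∀ x, (c :: rest).count x = s.toList.count x := fun x => hperm.count_eq x
    constructor
    · rintro (h | ⟨x, hx, hxc, h3⟩)
      · refine ⟨c, (hmemiff c).mp List.mem_cons_self, ?_⟩
        rw [← hcountiff c]
        simp only [List.count_cons_self]
        omega
      · refine ⟨x, (hmemiff x).mp (List.mem_cons_of_mem _ hx), ?_⟩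
        rw [← hcountiff x, List.count_cons, if_neg (by simp [Ne.symm hxc])]
        simpa using h3
    · rintro ⟨x, hx, h3⟩
      rw [← hcountiff x] at h3
      by_cases hxc : x = c
      · subst hxc
        left
        simp only [List.count_cons_self] at h3
        omega
      · right
        rcases List.mem_cons.mp ((hmemiff x).mpr hx) with h' | h'
        · exact absurd h' hxc
        · refine ⟨x, h', hxc, ?_⟩
          rw [List.count_cons, if_neg (by simp [Ne.symm hxc])] at h3
          simpa using h3

-- ===== VERDICT (by name: the statement is the Claim_ definition above) =====
theorem countThree_spec : Claim_equal_countThree := by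
  intro sentence _
  unfold Spec_countThree
  rw [countThree_char, countThree_alt_char]
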